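-- pv_equiv track=rewrite | github.com/zyinghua/clora-wan | diffsynth/utils/lora/blora.py | resolve_dit_block_indices
-- ===== SOURCE A (Python) =====
-- from typing import List, Optional, Sequence, Tuple
--
-- def resolve_dit_block_indices(
--     num_layers: int, block_ids: Sequence[int], stride: int = 1
-- ) -> List[int]:
--     """Expand (block_ids, stride) into the set of concrete DiT block indices."""
--     idxs = []
--     for b in block_ids:
--         start = b * stride
--         for i in range(start, min(start + stride, num_layers)):
--             if i >= 0:
--                 idxs.append(i)
--     return sorted(set(idxs))
-- ===== SOURCE B (Python) =====
-- def resolve_dit_block_indices(num_layers, block_ids, stride=1):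
--     """Expand (block_ids, stride) into the set of concrete DiT block indices."""
--     if stride <= 0:
--         return []
--     bs = sorted(b for b in set(block_ids) if 0 <= b and b * stride < num_layers)
--     total = len(bs) * stride
--     if bs and (bs[-1] + 1) * stride > num_layers:
--         total -= (bs[-1] + 1) * stride - num_layers
--     return [bs[j // stride] * stride + j % stride for j in range(total)]
-- ===== Notes on version B (the rewrite author's own statement) =====
-- stated objective: faster
-- what changed: Instead of expanding every block id into a clipped range, filtering negatives per element and deduplicating/sorting all collected indices, B sorts/filters only the block-id set once and computes the j-th output element directly as bs[j // stride] * stride + j % stride over a single flat index range, so the final sorted(set(...)) over m indices disappears.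
import Mathlib
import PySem

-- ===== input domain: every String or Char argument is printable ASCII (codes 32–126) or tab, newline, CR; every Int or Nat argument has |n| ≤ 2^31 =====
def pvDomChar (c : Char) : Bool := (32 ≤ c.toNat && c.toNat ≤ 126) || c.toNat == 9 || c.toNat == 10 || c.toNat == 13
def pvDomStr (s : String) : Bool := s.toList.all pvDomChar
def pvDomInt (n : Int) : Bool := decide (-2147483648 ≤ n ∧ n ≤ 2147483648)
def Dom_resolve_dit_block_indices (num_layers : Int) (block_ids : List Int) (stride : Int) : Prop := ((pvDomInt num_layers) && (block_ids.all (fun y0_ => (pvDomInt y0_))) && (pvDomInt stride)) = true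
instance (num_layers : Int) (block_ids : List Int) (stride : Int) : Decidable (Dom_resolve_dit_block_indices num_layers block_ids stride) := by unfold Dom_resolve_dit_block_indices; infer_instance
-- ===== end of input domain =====

-- B computes the j-th output element directly as bs[j // stride] * stride + j % stride over one flat
-- index range (bs = sorted relevant block ids), with no per-block range expansion and no final
-- dedupe/sort (objective: alternative).

-- ===== PORT A =====
def resolve_dit_block_indices (num_layers : Int) (block_ids : List Int) (stride : Int) : List Int :=
  let idxs : List Int := block_ids.foldl (fun idxs b =>
    let start := b * stride
    (PySem.List.pyRange start (min (start + stride) num_layers) 1).foldl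
      (fun idxs i => if i ≥ 0 then idxs ++ [i] else idxs) idxs) []
  PySem.List.sorted (PySem.Set.ofList idxs) (fun x => x) false

-- ===== PORT B =====
-- bs[j // stride] is always in range here (j < len(bs)*stride), so the '.getD 0' default is unreachable.
def resolve_dit_block_indices_alt (num_layers : Int) (block_ids : List Int) (stride : Int) : List Int :=
  if stride ≤ 0 then []
  else
    let bs := PySem.List.sorted
      ((PySem.Set.ofList block_ids).filter (fun b => decide (0 ≤ b) && decide (b * stride < num_layers)))
      (fun x => x) false
    let total0 : Int := (bs.length : Int) * stride
    let total : Int :=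
      match PySem.List.pyGet? bs (-1) with
      | some bl => if (bl + 1) * stride > num_layers
          then total0 - ((bl + 1) * stride - num_layers) else total0
      | none => total0
    (PySem.List.pyRange 0 total 1).map (fun j =>
      (PySem.List.pyGet? bs (PySem.Int.floordiv j stride)).getD 0 * stride + PySem.Int.mod j stride)

-- ===== PRECONDITION & SPEC =====
def Spec_resolve_dit_block_indices (num_layers : Int) (block_ids : List Int) (stride : Int) (out : List Int) : Prop := out = resolve_dit_block_indices_alt num_layers block_ids stride
instance (num_layers : Int) (block_ids : List Int) (stride : Int) (out : List Int) : Decidable (Spec_resolve_dit_block_indices num_layers block_ids stride out) := by unfold Spec_resolve_dit_block_indices; infer_instance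

-- ===== CLAIM (what is proved, stated in full; the proofs are below) =====
def Claim_equal_resolve_dit_block_indices : Prop := ∀ (num_layers : Int) (block_ids : List Int) (stride : Int), Dom_resolve_dit_block_indices num_layers block_ids stride → Spec_resolve_dit_block_indices num_layers block_ids stride (resolve_dit_block_indices num_layers block_ids stride)

-- ===== LEMMAS AND PROOFS =====

-- A's accumulated list, written as a flatMap of filtered ranges.
def idxsOf (num_layers : Int) (block_ids : List Int) (stride : Int) : List Int :=
  block_ids.flatMap (fun b =>
    (PySem.List.pyRange (b * stride) (min (b * stride + stride) num_layers) 1).filter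
      (fun i => i ≥ 0))

theorem foldl_eq_idxsOf (num_layers : Int) (block_ids : List Int) (stride : Int) :
    block_ids.foldl (fun idxs b =>
      (PySem.List.pyRange (b * stride) (min (b * stride + stride) num_layers) 1).foldl
        (fun idxs i => if i ≥ 0 then idxs ++ [i] else idxs) idxs) []
    = idxsOf num_layers block_ids stride := by
  suffices h : ∀ (l : List Int) (acc : List Int),
      l.foldl (fun idxs b =>
        (PySem.List.pyRange (b * stride) (min (b * stride + stride) num_layers) 1).foldl
          (fun idxs i => if i ≥ 0 then idxs ++ [i] else idxs) idxs) acc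
      = acc ++ idxsOf num_layers l stride by
    simpa using h block_ids []
  intro l
  induction l with
  | nil => intro acc; simp [idxsOf]
  | cons b t ih =>
    intro acc
    rw [List.foldl_cons, PySem.List.foldl_append_ite_eq_filter, ih]
    simp [idxsOf, List.append_assoc]

theorem mem_idxsOf (num_layers : Int) (block_ids : List Int) (stride : Int)
    (hs : 0 < stride) (x : Int) :
    x ∈ idxsOf num_layers block_ids stride ↔
      (0 ≤ x ∧ x < num_layers ∧ PySem.Int.floordiv x stride ∈ block_ids) := by
  simp only [idxsOf, List.mem_flatMap, List.mem_filter, PySem.List.mem_pyRange_one,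
    decide_eq_true_eq, ge_iff_le, lt_min_iff]
  constructor
  · rintro ⟨b, hb, ⟨⟨h1, h2, h3⟩, h0⟩⟩
    refine ⟨h0, h3, ?_⟩
    have : PySem.Int.floordiv x stride = b := by
      rw [PySem.Int.floordiv_eq_iff_of_pos hs]
      constructor <;> nlinarith
    rwa [this]
  · rintro ⟨h0, hn, hb⟩
    have h := (PySem.Int.floordiv_eq_iff_of_pos hs (a := x)
        (q := PySem.Int.floordiv x stride)).mp rfl
    exact ⟨PySem.Int.floordiv x stride, hb, ⟨⟨h.1, by nlinarith [h.2], hn⟩, h0⟩⟩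

theorem idxsOf_nil_of_nonpos (num_layers : Int) (block_ids : List Int) (stride : Int)
    (hs : stride ≤ 0) : idxsOf num_layers block_ids stride = [] := by
  simp only [idxsOf, List.flatMap_eq_nil_iff]
  intro b hb
  rw [PySem.List.pyRange_one_eq_nil (by omega : min (b * stride + stride) num_layers ≤ b * stride)]
  rfl

-- B's building blocks, named for the proofs.
def bsOf (num_layers : Int) (block_ids : List Int) (stride : Int) : List Int :=
  PySem.List.sorted
    ((PySem.Set.ofList block_ids).filter (fun b => decide (0 ≤ b) && decide (b * stride < num_layers)))
    (fun x => x) false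

def totalOf (num_layers : Int) (block_ids : List Int) (stride : Int) : Int :=
  match PySem.List.pyGet? (bsOf num_layers block_ids stride) (-1) with
  | some bl => if (bl + 1) * stride > num_layers
      then ((bsOf num_layers block_ids stride).length : Int) * stride - ((bl + 1) * stride - num_layers)
      else ((bsOf num_layers block_ids stride).length : Int) * stride
  | none => ((bsOf num_layers block_ids stride).length : Int) * stride

def vOf (num_layers : Int) (block_ids : List Int) (stride : Int) (j : Int) : Int :=
  (PySem.List.pyGet? (bsOf num_layers block_ids stride) (PySem.Int.floordiv j stride)).getD 0 * stride
    + PySem.Int.mod j stride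

theorem alt_eq (num_layers : Int) (block_ids : List Int) (stride : Int) (hs : ¬ stride ≤ 0) :
    resolve_dit_block_indices_alt num_layers block_ids stride
      = (PySem.List.pyRange 0 (totalOf num_layers block_ids stride) 1).map
          (vOf num_layers block_ids stride) := by
  unfold resolve_dit_block_indices_alt totalOf vOf bsOf
  rw [if_neg hs]

theorem bs_pairwise (num_layers : Int) (block_ids : List Int) (stride : Int) :
    (bsOf num_layers block_ids stride).Pairwise (· < ·) := by
  have hnd : (bsOf num_layers block_ids stride).Nodup :=
    (PySem.List.sorted_perm _ _ _).nodup_iff.mpr ((PySem.Set.nodup_ofList block_ids).filter _)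
  have hle : (bsOf num_layers block_ids stride).Pairwise (· ≤ ·) :=
    PySem.List.sorted_pairwise _ _
  exact (hle.and hnd).imp (fun h => lt_of_le_of_ne h.1 h.2)

theorem bs_mem (num_layers : Int) (block_ids : List Int) (stride : Int) (b : Int) :
    b ∈ bsOf num_layers block_ids stride ↔
      b ∈ block_ids ∧ 0 ≤ b ∧ b * stride < num_layers := by
  simp [bsOf, PySem.List.mem_sorted, List.mem_filter, PySem.Set.mem_ofList]

theorem total_le (num_layers : Int) (block_ids : List Int) (stride : Int) :
    totalOf num_layers block_ids stride
      ≤ ((bsOf num_layers block_ids stride).length : Int) * stride := by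
  unfold totalOf
  rcases PySem.List.pyGet? (bsOf num_layers block_ids stride) (-1) with _ | bl
  · simp
  · simp only
    split_ifs with h <;> omega

-- every index 0 ≤ j < totalOf splits as j = q*stride + r with q an in-range index of bs
theorem j_split (num_layers : Int) (block_ids : List Int) (stride : Int)
    (hs : 0 < stride) (j : Int) (h0 : 0 ≤ j) (hjt : j < totalOf num_layers block_ids stride) :
    ∃ (q : Nat) (hq : q < (bsOf num_layers block_ids stride).length),
      PySem.Int.floordiv j stride = (q : Int) ∧
      vOf num_layers block_ids stride j
        = (bsOf num_layers block_ids stride)[q] * stride + (j - (q : Int) * stride) ∧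
      0 ≤ j - (q : Int) * stride ∧ j - (q : Int) * stride < stride := by
  have htot := total_le num_layers block_ids stride
  have hfd := (PySem.Int.floordiv_eq_iff_of_pos hs (a := j)
      (q := PySem.Int.floordiv j stride)).mp rfl
  set qI := PySem.Int.floordiv j stride with hqI
  have hq0 : 0 ≤ qI := by nlinarith [hfd.1, hfd.2]
  have hqlen : qI < ((bsOf num_layers block_ids stride).length : Int) := by
    by_contra hcon
    push Not at hcon
    have : ((bsOf num_layers block_ids stride).length : Int) * stride ≤ qI * stride :=
      mul_le_mul_of_nonneg_right hcon (le_of_lt hs)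
    omega
  have hqcast : qI = ((qI.toNat : Nat) : Int) := by omega
  refine ⟨qI.toNat, by omega, by omega, ?_, by nlinarith [hfd.1], by nlinarith [hfd.2]⟩
  unfold vOf
  rw [← hqI, PySem.List.pyGet?_eq_some_getElem _ hq0 (by omega)]
  have hmod : PySem.Int.mod j stride = j - qI * stride := by
    have := PySem.Int.floordiv_mul_add_mod j stride
    rw [← hqI] at this; omega
  simp only [Option.getD_some]
  rw [hmod, ← hqcast]

-- q must be the LAST index of bs whenever its window overflows num_layers
theorem q_eq_last (num_layers : Int) (block_ids : List Int) (stride : Int)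
    (hs : 0 < stride) (q : Nat) (hq : q < (bsOf num_layers block_ids stride).length)
    (hover : num_layers < ((bsOf num_layers block_ids stride)[q] + 1) * stride) :
    q = (bsOf num_layers block_ids stride).length - 1 := by
  set bs := bsOf num_layers block_ids stride with hbs
  by_contra hne
  have hlt : q < bs.length - 1 := by omega
  have hl : bs.length - 1 < bs.length := by omega
  have hblt : bs[q] < bs[bs.length - 1] :=
    List.pairwise_iff_getElem.mp (bs_pairwise num_layers block_ids stride) q (bs.length - 1) hq hl hlt
  have hmem : bs[bs.length - 1] ∈ bs := List.getElem_mem hl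
  have hml := ((bs_mem num_layers block_ids stride _).mp hmem).2.2
  nlinarith

theorem getLast?_bs (num_layers : Int) (block_ids : List Int) (stride : Int)
    (h : 0 < (bsOf num_layers block_ids stride).length) :
    PySem.List.pyGet? (bsOf num_layers block_ids stride) (-1)
      = some (bsOf num_layers block_ids stride)[(bsOf num_layers block_ids stride).length - 1] := by
  rw [PySem.List.pyGet?_neg_one, List.getLast?_eq_getElem?, List.getElem?_eq_getElem (by omega)]

-- the value at any admitted index is below num_layers
theorem v_lt (num_layers : Int) (block_ids : List Int) (stride : Int)
    (hs : 0 < stride) (q : Nat) (hq : q < (bsOf num_layers block_ids stride).length)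
    (r : Int) (_hr0 : 0 ≤ r) (hrs : r < stride)
    (hjt : (q : Int) * stride + r < totalOf num_layers block_ids stride) :
    (bsOf num_layers block_ids stride)[q] * stride + r < num_layers := by
  set bs := bsOf num_layers block_ids stride with hbs
  by_cases hov : ((bs[q] + 1) * stride ≤ num_layers)
  · nlinarith
  · push Not at hov
    have hqe := q_eq_last num_layers block_ids stride hs q hq hov
    subst hqe
    have htt : totalOf num_layers block_ids stride
        = (bs.length : Int) * stride - ((bs[bs.length - 1] + 1) * stride - num_layers) := by
      unfold totalOf
      rw [← hbs, getLast?_bs num_layers block_ids stride (by omega)]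
      simp only
      rw [if_pos hov]
    rw [htt] at hjt
    have hql : ((bs.length - 1 : Nat) : Int) = (bs.length : Int) - 1 := by omega
    nlinarith

-- any admissible (q, r) pair indexes below totalOf
theorem lt_total (num_layers : Int) (block_ids : List Int) (stride : Int)
    (hs : 0 < stride) (q : Nat) (hq : q < (bsOf num_layers block_ids stride).length)
    (r : Int) (_hr0 : 0 ≤ r) (hrs : r < stride)
    (hlt : (bsOf num_layers block_ids stride)[q] * stride + r < num_layers) :
    (q : Int) * stride + r < totalOf num_layers block_ids stride := by
  set bs := bsOf num_layers block_ids stride with hbs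
  have hlast : bs.length - 1 < bs.length := by omega
  set bl := bs[bs.length - 1] with hbl
  have hble : bs[q] ≤ bl := by
    rcases Nat.lt_or_ge q (bs.length - 1) with hc | hc
    · exact le_of_lt (List.pairwise_iff_getElem.mp (bs_pairwise num_layers block_ids stride)
        q (bs.length - 1) hq hlast hc)
    · have : q = bs.length - 1 := by omega
      simp [this, hbl]
  have hblw := ((bs_mem num_layers block_ids stride bl).mp (List.getElem_mem hlast)).2.2
  have htt : totalOf num_layers block_ids stride
      = if (bl + 1) * stride > num_layers
        then (bs.length : Int) * stride - ((bl + 1) * stride - num_layers)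
        else (bs.length : Int) * stride := by
    unfold totalOf
    rw [← hbs, getLast?_bs num_layers block_ids stride (by omega)]
  rw [htt]
  split_ifs with hov
  · rcases Nat.lt_or_ge q (bs.length - 1) with hc | hc
    · have hblt : bs[q] < bl :=
        List.pairwise_iff_getElem.mp (bs_pairwise num_layers block_ids stride)
          q (bs.length - 1) hq hlast hc
      have hq1 : (q : Int) + 1 ≤ (bs.length : Int) - 1 := by omega
      nlinarith
    · have hqe : q = bs.length - 1 := by omega
      have : bs[q] = bl := by simp [hqe, hbl]
      have hq1 : (q : Int) = (bs.length : Int) - 1 := by omega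
      nlinarith
  · have hq1 : (q : Int) + 1 ≤ (bs.length : Int) := by omega
    nlinarith

-- B's list has exactly the members A collects
theorem alt_mem (num_layers : Int) (block_ids : List Int) (stride : Int)
    (hs : 0 < stride) (x : Int) :
    x ∈ (PySem.List.pyRange 0 (totalOf num_layers block_ids stride) 1).map
          (vOf num_layers block_ids stride) ↔
      (0 ≤ x ∧ x < num_layers ∧ PySem.Int.floordiv x stride ∈ block_ids) := by
  rw [List.mem_map]
  constructor
  · rintro ⟨j, hj, hv⟩
    rw [PySem.List.mem_pyRange_one] at hj
    obtain ⟨q, hq, hfd, hveq, hr0, hrs⟩ :=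
      j_split num_layers block_ids stride hs j hj.1 hj.2
    set bs := bsOf num_layers block_ids stride with hbs
    have hbmem := (bs_mem num_layers block_ids stride bs[q]).mp (List.getElem_mem hq)
    have hxlt : bs[q] * stride + (j - (q : Int) * stride) < num_layers :=
      v_lt num_layers block_ids stride hs q hq _ hr0 hrs (by omega)
    rw [← hv, hveq]
    refine ⟨by nlinarith [hbmem.2.1], hxlt, ?_⟩
    have : PySem.Int.floordiv (bs[q] * stride + (j - (q : Int) * stride)) stride = bs[q] := by
      rw [PySem.Int.floordiv_eq_iff_of_pos hs]
      constructor <;> nlinarith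
    rw [this]
    exact hbmem.1
  · rintro ⟨h0, hn, hb⟩
    set b := PySem.Int.floordiv x stride with hbdef
    have hfd := (PySem.Int.floordiv_eq_iff_of_pos hs (a := x) (q := b)).mp rfl
    have hbge : 0 ≤ b := by nlinarith
    have hbmem : b ∈ bsOf num_layers block_ids stride :=
      (bs_mem num_layers block_ids stride b).mpr ⟨hb, hbge, by nlinarith⟩
    obtain ⟨q, hq, hbq⟩ := List.mem_iff_getElem.mp hbmem
    have hrlt : x - b * stride < stride := by nlinarith [hfd.2]
    refine ⟨(q : Int) * stride + (x - b * stride), ?_, ?_⟩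
    · rw [PySem.List.mem_pyRange_one]
      refine ⟨by nlinarith, ?_⟩
      exact lt_total num_layers block_ids stride hs q hq _ (by omega) hrlt
        (by rw [hbq]; omega)
    · obtain ⟨q', hq', hfd', hveq, hr0, hrs⟩ :=
        j_split num_layers block_ids stride hs ((q : Int) * stride + (x - b * stride))
          (by nlinarith)
          (lt_total num_layers block_ids stride hs q hq _ (by omega) hrlt
            (by rw [hbq]; omega))
      have hqq : (q' : Int) = (q : Int) := by
        have h2 := (PySem.Int.floordiv_eq_iff_of_pos hs
          (a := (q : Int) * stride + (x - b * stride)) (q := (q : Int))).mpr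
          ⟨by omega, by nlinarith⟩
        rw [hfd'] at h2; omega
      have hqe : q' = q := by omega
      subst hqe
      rw [hveq, hbq]
      omega

theorem alt_pairwise (num_layers : Int) (block_ids : List Int) (stride : Int)
    (hs : 0 < stride) :
    ((PySem.List.pyRange 0 (totalOf num_layers block_ids stride) 1).map
      (vOf num_layers block_ids stride)).Pairwise (· < ·) := by
  set total := totalOf num_layers block_ids stride with htotal
  rw [List.pairwise_iff_getElem]
  intro k k' hk hk' hkk
  simp only [List.length_map, PySem.List.length_pyRange_one] at hk hk'
  simp only [List.getElem_map, PySem.List.getElem_pyRange_one, zero_add]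
  have hjt : (k : Int) < total := by omega
  have hjt' : (k' : Int) < total := by omega
  obtain ⟨q, hq, hfd, hveq, hr0, hrs⟩ :=
    j_split num_layers block_ids stride hs (k : Int) (by omega) hjt
  obtain ⟨q', hq', hfd', hveq', hr0', hrs'⟩ :=
    j_split num_layers block_ids stride hs (k' : Int) (by omega) hjt'
  set bs := bsOf num_layers block_ids stride with hbs
  rw [hveq, hveq']
  have hkk' : (k : Int) < (k' : Int) := by omega
  have hqle : q ≤ q' := by
    by_contra hcon
    push Not at hcon
    have : (q' : Int) + 1 ≤ (q : Int) := by omega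
    nlinarith
  rcases Nat.lt_or_ge q q' with hc | hc
  · have hblt : bs[q] < bs[q'] :=
      List.pairwise_iff_getElem.mp (bs_pairwise num_layers block_ids stride) q q' hq hq' hc
    nlinarith
  · have hqe : q = q' := by omega
    subst hqe
    omega

-- ===== VERDICT (by name: the statement is the Claim_ definition above) =====
theorem resolve_dit_block_indices_spec : Claim_equal_resolve_dit_block_indices := by
  intro num_layers block_ids stride _
  unfold Spec_resolve_dit_block_indices resolve_dit_block_indices
  simp only
  rw [foldl_eq_idxsOf]
  by_cases hs : stride ≤ 0
  · rw [idxsOf_nil_of_nonpos num_layers block_ids stride hs]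
    unfold resolve_dit_block_indices_alt
    rw [if_pos hs]
    rfl
  · rw [alt_eq num_layers block_ids stride hs]
    push Not at hs
    apply PySem.List.sorted_eq_of_perm_of_pairwise_lt
    · rw [List.perm_ext_iff_of_nodup
        ((alt_pairwise num_layers block_ids stride hs).nodup)
        (PySem.Set.nodup_ofList _)]
      intro x
      rw [alt_mem num_layers block_ids stride hs, PySem.Set.mem_ofList,
        mem_idxsOf num_layers block_ids stride hs]
    · exact alt_pairwise num_layers block_ids stride hs
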